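-- pv_equiv track=rewrite | github.com/freejstone/CONGA | CONGA/peptides.py | count_cysteines_in_pepseqs
-- ===== SOURCE A (Python) =====
-- def count_cysteines_in_pepseqs(pepseqs):
--     result = []
--     for pepseq in pepseqs:
--         n_cys = pepseq.count('C')
--         while n_cys > len(result) - 1:
--             result.append(0)
--         result[n_cys] += 1
--     return result
-- ===== SOURCE B (Python) =====
-- def count_cysteines_in_pepseqs(pepseqs):
--     counts = [pepseq.count('C') for pepseq in pepseqs]
--     if not counts:
--         return []
--     return [counts.count(k) for k in range(max(counts) + 1)]
-- ===== Notes on version B (the rewrite author's own statement) =====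
-- stated objective: alternative
-- what changed: Replaces A's single incremental pass that grows the result list while scanning (while-append padding + in-place increment) with staged bucket counting: first collect all cysteine counts, then for every k in range(max+1) count its occurrences with a separate scan (counts.count(k)).
import Mathlib
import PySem

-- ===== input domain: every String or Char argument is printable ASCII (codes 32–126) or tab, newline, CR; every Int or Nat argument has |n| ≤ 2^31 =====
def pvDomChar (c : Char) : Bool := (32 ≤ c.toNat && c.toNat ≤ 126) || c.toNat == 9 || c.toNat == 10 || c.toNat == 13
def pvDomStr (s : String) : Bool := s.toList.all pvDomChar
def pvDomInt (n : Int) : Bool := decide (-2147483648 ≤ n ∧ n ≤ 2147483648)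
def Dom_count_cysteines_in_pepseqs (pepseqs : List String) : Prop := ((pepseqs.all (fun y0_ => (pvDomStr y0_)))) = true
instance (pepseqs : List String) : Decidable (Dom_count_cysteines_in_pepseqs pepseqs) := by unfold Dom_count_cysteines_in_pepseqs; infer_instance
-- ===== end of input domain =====

-- B replaces A's single incremental grow-the-list pass with staged bucket counting:
-- collect all cysteine counts, then count each bucket k in 0..max with its own scan
-- (objective: alternative; B is not faster).

-- ===== PORT A =====
-- the inner 'while n_cys > len(result) - 1: result.append(0)' loop of A
def pvPadA (res : List Int) (n : Nat) : List Int :=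
  if (res.length : Int) - 1 < (n : Int) then pvPadA (res ++ [0]) n else res
termination_by n + 1 - res.length
decreasing_by simp at *; omega

def count_cysteines_in_pepseqs (pepseqs : List String) : List Int :=
  pepseqs.foldl (fun result pepseq =>
    let n_cys := PySem.Str.count pepseq "C"
    let result := pvPadA result n_cys
    -- result[n_cys] += 1  (n_cys is in range after the while loop, so getD is exact)
    result.set n_cys (result.getD n_cys 0 + 1)) []

-- ===== PORT B =====
def count_cysteines_in_pepseqs_alt (pepseqs : List String) : List Int :=
  let counts : List Int := pepseqs.map (fun pepseq => (PySem.Str.count pepseq "C" : Int))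
  -- 'if not counts: return []' + 'max(counts)': max? is none exactly on the empty list
  match PySem.List.max? counts (fun x => x) with
  | none => []
  | some m => (PySem.List.pyRange 0 (m + 1) 1).map (fun k => (PySem.List.count counts k : Int))

-- ===== PRECONDITION & SPEC =====
def Spec_count_cysteines_in_pepseqs (pepseqs : List String) (out : List Int) : Prop := out = count_cysteines_in_pepseqs_alt pepseqs
instance (pepseqs : List String) (out : List Int) : Decidable (Spec_count_cysteines_in_pepseqs pepseqs out) := by unfold Spec_count_cysteines_in_pepseqs; infer_instance

-- ===== CLAIM (what is proved, stated in full; the proofs are below) =====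
def Claim_equal_count_cysteines_in_pepseqs : Prop := ∀ (pepseqs : List String), Dom_count_cysteines_in_pepseqs pepseqs → Spec_count_cysteines_in_pepseqs pepseqs (count_cysteines_in_pepseqs pepseqs)

-- ===== LEMMAS AND PROOFS =====

-- the length A's result reaches: 0 for no peptides, (max cysteine count)+1 otherwise
def pvLenOf (cs : List Nat) : Nat := cs.foldl (fun m n => max m (n + 1)) 0

lemma pvPadA_eq (res : List Int) (n : Nat) :
    pvPadA res n = res ++ List.replicate (n + 1 - res.length) 0 := by
  by_cases h : (res.length : Int) - 1 < (n : Int)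
  · rw [pvPadA, if_pos h, pvPadA_eq (res ++ [0]) n]
    have : n + 1 - res.length = (n + 1 - (res.length + 1)) + 1 := by omega
    simp [this, List.replicate_succ, List.append_assoc]
  · rw [pvPadA, if_neg h]
    have : n + 1 - res.length = 0 := by omega
    simp [this]
termination_by n + 1 - res.length
decreasing_by simp; omega

lemma pvLenOf_append (cs : List Nat) (n : Nat) :
    pvLenOf (cs ++ [n]) = max (pvLenOf cs) (n + 1) := by
  simp [pvLenOf, List.foldl_append]

lemma pvLenOf_acc (cs : List Nat) (a : Nat) :
    cs.foldl (fun m n => max m (n + 1)) a = max a (cs.foldl (fun m n => max m (n + 1)) 0) := by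
  induction cs generalizing a with
  | nil => simp
  | cons c cs ih =>
      simp only [List.foldl_cons]
      rw [ih (max a (c + 1)), ih (max 0 (c + 1))]
      omega

lemma pvLenOf_cons (c : Nat) (cs : List Nat) :
    pvLenOf (c :: cs) = max (c + 1) (pvLenOf cs) := by
  simp only [pvLenOf, List.foldl_cons]
  rw [pvLenOf_acc]
  omega

lemma lt_pvLenOf_of_mem {cs : List Nat} {n : Nat} (h : n ∈ cs) : n < pvLenOf cs := by
  induction cs with
  | nil => simp at h
  | cons c cs ih =>
      rw [pvLenOf_cons]
      rcases List.mem_cons.1 h with h | h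
      · omega
      · have := ih h; omega

lemma pvLenOf_le {cs : List Nat} {m : Nat} (h : ∀ n ∈ cs, n ≤ m) : pvLenOf cs ≤ m + 1 := by
  induction cs with
  | nil => simp [pvLenOf]
  | cons c cs ih =>
      rw [pvLenOf_cons]
      have h1 := h c (List.mem_cons_self ..)
      have h2 := ih (fun n hn => h n (List.mem_cons_of_mem _ hn))
      omega

lemma length_pvPadA (res : List Int) (n : Nat) :
    (pvPadA res n).length = max res.length (n + 1) := by
  rw [pvPadA_eq]; simp; omega

lemma getD_pvPadA (res : List Int) (n j : Nat) :
    (pvPadA res n).getD j 0 = res.getD j 0 := by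
  rw [pvPadA_eq]
  rcases lt_or_ge j res.length with h | h
  · simp [List.getD, List.getElem?_append_left h]
  · rw [List.getD_eq_default _ _ h]
    simp only [List.getD, List.getElem?_append_right h, List.getElem?_replicate]
    split <;> simp

lemma A_spec (pepseqs : List String) :
    (count_cysteines_in_pepseqs pepseqs).length
        = pvLenOf (pepseqs.map (fun p => PySem.Str.count p "C"))
    ∧ ∀ j, (count_cysteines_in_pepseqs pepseqs).getD j 0
        = ((pepseqs.map (fun p => PySem.Str.count p "C")).count j : Int) := by
  induction pepseqs using List.reverseRecOn with
  | nil => simp [count_cysteines_in_pepseqs, pvLenOf]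
  | append_singleton l p ih =>
      obtain ⟨ihlen, ihgetD⟩ := ih
      simp only [count_cysteines_in_pepseqs, List.foldl_append, List.foldl_cons,
        List.foldl_nil] at *
      set n := PySem.Str.count p "C" with hn
      set r := l.foldl (fun result pepseq =>
        (pvPadA result (PySem.Str.count pepseq "C")).set (PySem.Str.count pepseq "C")
          ((pvPadA result (PySem.Str.count pepseq "C")).getD (PySem.Str.count pepseq "C") 0 + 1)) []
      have hnlt : n < (pvPadA r n).length := by rw [length_pvPadA]; omega
      constructor
      · rw [List.length_set, length_pvPadA, List.map_append, List.map_singleton,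
          pvLenOf_append, ihlen]
      · intro j
        rw [List.map_append, List.map_singleton, List.count_append]
        have hset : n < ((pvPadA r n).set n ((pvPadA r n).getD n 0 + 1)).length := by
          rw [List.length_set]; exact hnlt
        by_cases hj : j = n
        · subst hj
          rw [List.getD_eq_getElem _ _ hset, List.getElem_set_self hset,
            getD_pvPadA, ihgetD, show List.count n [n] = 1 from by simp]
          push_cast; omega
        · rw [show ((pvPadA r n).set n ((pvPadA r n).getD n 0 + 1)).getD j 0
              = (pvPadA r n).getD j 0 from ?_, getD_pvPadA, ihgetD,
            show List.count j [n] = 0 from List.count_eq_zero.2 (by simp; exact hj)]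
          · push_cast; omega
          · simp [List.getD, Ne.symm hj]

-- ===== VERDICT (by name: the statement is the Claim_ definition above) =====
theorem count_cysteines_in_pepseqs_spec : Claim_equal_count_cysteines_in_pepseqs := by
  intro pepseqs _
  unfold Spec_count_cysteines_in_pepseqs count_cysteines_in_pepseqs_alt
  obtain ⟨hlen, hgetD⟩ := A_spec pepseqs
  set cs := pepseqs.map (fun p => PySem.Str.count p "C") with hcs
  have hmapmap : pepseqs.map (fun pepseq => (PySem.Str.count pepseq "C" : Int))
      = cs.map Int.ofNat := by
    rw [hcs, List.map_map]
    rfl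
  simp only [hmapmap]
  cases hmax : PySem.List.max? (cs.map Int.ofNat) (fun x => x) with
  | none =>
      have hnil : cs = [] := by
        have := (PySem.List.max?_eq_none_iff (cs.map Int.ofNat) (fun x => x)).1 hmax
        exact List.map_eq_nil_iff.1 this
      have : pepseqs = [] := List.map_eq_nil_iff.1 hnil
      subst this
      rfl
  | some M =>
      obtain ⟨m, hm_mem, hmM⟩ := List.mem_map.1 (PySem.List.max?_mem hmax)
      have hub : ∀ k ∈ cs, k ≤ m := by
        intro k hk
        have := PySem.List.max?_isMax hmax (Int.ofNat k) (List.mem_map_of_mem hk)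
        rw [← hmM] at this
        exact Int.ofNat_le.1 this
      have hL : pvLenOf cs = m + 1 :=
        le_antisymm (pvLenOf_le hub) (lt_pvLenOf_of_mem hm_mem)
      subst hmM
      apply List.ext_getElem
      · rw [hlen, hL, List.length_map, PySem.List.length_pyRange_one]
        simp
      · intro i h1 h2
        rw [← List.getD_eq_getElem _ 0 h1, hgetD i]
        rw [List.getElem_map, PySem.List.getElem_pyRange_one]
        have hz : ((0 : Int) + (i : Int)) = Int.ofNat i := by simp
        rw [hz, PySem.List.count_eq,
          List.count_map_of_injective cs Int.ofNat
            (fun a b h => Int.ofNat.inj h) i]
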